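-- pv_equiv track=rewrite | github.com/myankb08/CS613-trail | app.py | detect_repetition
-- ===== SOURCE A (Python) =====
-- def detect_repetition(text):
--     """Detect repetitive patterns"""
--     words = text.split()
--     if len(words) == 0:
--         return False, "OK"
--
--     max_consecutive = 1
--     current_consecutive = 1
--
--     for i in range(1, len(words)):
--         if words[i] == words[i-1]:
--             current_consecutive += 1
--             max_consecutive = max(max_consecutive, current_consecutive)
--         else:
--             current_consecutive = 1
--
--     if max_consecutive >= 3:
--         return True, f"Excessive repetition detected ({max_consecutive}x)"
--     return False, "OK"
-- ===== SOURCE B (Python) =====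
-- def detect_repetition(text):
--     """Detect repetitive patterns"""
--     words = text.split()
--     if not words:
--         return False, "OK"
--
--     run_lengths = []
--     rest = words
--     while rest:
--         head = rest[0]
--         k = 1
--         while k < len(rest) and rest[k] == head:
--             k += 1
--         run_lengths.append(k)
--         rest = rest[k:]
--
--     max_consecutive = max(run_lengths)
--     if max_consecutive >= 3:
--         return True, f"Excessive repetition detected ({max_consecutive}x)"
--     return False, "OK"
-- ===== Notes on version B (the rewrite author's own statement) =====
-- stated objective: alternative
-- what changed: A's single pass with running current/max counters over word indices is replaced by a group-and-reduce formulation: split the word list into maximal consecutive runs, collect the run lengths, and take their max before the same threshold check.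
import Mathlib
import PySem

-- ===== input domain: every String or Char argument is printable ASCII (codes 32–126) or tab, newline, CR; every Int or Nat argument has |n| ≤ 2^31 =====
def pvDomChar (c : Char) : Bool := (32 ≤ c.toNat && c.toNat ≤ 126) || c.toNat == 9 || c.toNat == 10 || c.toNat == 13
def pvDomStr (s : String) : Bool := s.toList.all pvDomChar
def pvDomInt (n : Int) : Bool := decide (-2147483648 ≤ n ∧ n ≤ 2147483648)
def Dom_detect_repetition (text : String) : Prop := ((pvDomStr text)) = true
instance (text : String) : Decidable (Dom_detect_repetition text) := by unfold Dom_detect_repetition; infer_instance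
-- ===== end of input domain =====

-- B replaces A's running-counter scan by a group-and-reduce pass (split into runs, then max); same return value, alternative structure.

-- ===== PORT A =====
-- the body of A's for-loop, state = (max_consecutive, current_consecutive)
def pvStepA (ws : List String) (st : Int × Int) (i : Int) : Int × Int :=
  if PySem.List.pyGetD ws i "" == PySem.List.pyGetD ws (i - 1) "" then
    (max st.1 (st.2 + 1), st.2 + 1)
  else (st.1, 1)

def detect_repetition (text : String) : Bool × String :=
  let words := PySem.Str.split₀ text
  if PySem.List.len words == 0 then (false, "OK")
  else
    let st := (PySem.List.pyRange 1 (PySem.List.len words) 1).foldl (pvStepA words) (1, 1)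
    if st.1 ≥ 3 then
      (true, "Excessive repetition detected (" ++ PySem.Int.toStr st.1 ++ "x)")
    else (false, "OK")

-- ===== PORT B =====
-- the outer while-loop of B: the list of consecutive-run lengths
def pvGroups : List String → List Int
  | [] => []
  | x :: xs =>
    ((xs.takeWhile (fun y => y == x)).length + 1 : Int)
      :: pvGroups (xs.drop (xs.takeWhile (fun y => y == x)).length)
termination_by xs => xs.length
decreasing_by simp [List.length_drop]

def detect_repetition_alt (text : String) : Bool × String :=
  let words := PySem.Str.split₀ text
  if words.isEmpty then (false, "OK")
  else
    let runs := pvGroups words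
    let maxc := (PySem.List.max? runs (fun x => x)).getD 1  -- runs is nonempty here, so max never sees []
    if maxc ≥ 3 then
      (true, "Excessive repetition detected (" ++ PySem.Int.toStr maxc ++ "x)")
    else (false, "OK")

-- ===== PRECONDITION & SPEC =====
def Spec_detect_repetition (text : String) (out : Bool × String) : Prop := out = detect_repetition_alt text
instance (text : String) (out : Bool × String) : Decidable (Spec_detect_repetition text out) := by unfold Spec_detect_repetition; infer_instance

-- ===== CLAIM (what is proved, stated in full; the proofs are below) =====
def Claim_equal_detect_repetition : Prop := ∀ (text : String), Dom_detect_repetition text → Spec_detect_repetition text (detect_repetition text)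

-- ===== LEMMAS AND PROOFS =====

lemma pvGroups_nil : pvGroups [] = [] := by rw [pvGroups]

lemma pvGroups_cons (x : String) (xs : List String) :
    pvGroups (x :: xs)
      = ((xs.takeWhile (fun y => y == x)).length + 1 : Int)
          :: pvGroups (xs.drop (xs.takeWhile (fun y => y == x)).length) := by
  rw [pvGroups]

-- A's loop, rephrased as structural recursion on the word list with the previous word as state
def pvLoopA : String → List String → Int × Int → Int × Int
  | _, [], st => st
  | prev, x :: xs, st =>
    if x == prev then pvLoopA x xs (max st.1 (st.2 + 1), st.2 + 1) else pvLoopA x xs (st.1, 1)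

-- max over the runs of (prev-run already counted c) ++ xs
def pvMrc : String → Int → List String → Int
  | _, c, [] => c
  | prev, c, x :: xs => if x == prev then pvMrc x (c + 1) xs else max c (pvMrc x 1 xs)

lemma pvBridge (ws : List String) : ∀ (d k : Nat) (st : Int × Int),
    ws.length = k + 1 + d →
    (PySem.List.pyRange ((k : Int) + 1) ((ws.length : Nat) : Int) 1).foldl (pvStepA ws) st
      = pvLoopA (ws.getD k "") (ws.drop (k + 1)) st := by
  intro d
  induction d with
  | zero =>
    intro k st h
    rw [PySem.List.pyRange_one_eq_nil (by omega), List.drop_eq_nil_of_le (by omega)]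
    simp [pvLoopA]
  | succ d ih =>
    intro k st h
    have hk1 : k + 1 < ws.length := by omega
    have hk : k < ws.length := by omega
    have hgk : ws.getD k "" = ws[k] := List.getD_eq_getElem _ _ hk
    have hgk1 : ws.getD (k + 1) "" = ws[k + 1] := List.getD_eq_getElem _ _ hk1
    rw [PySem.List.pyRange_one_cons (by omega), List.foldl_cons]
    have e1 : (k : Int) + 1 + 1 = ((k + 1 : Nat) : Int) + 1 := by push_cast; ring
    have e2 : pvStepA ws st ((k : Int) + 1)
        = if ws[k + 1] == ws[k] then (max st.1 (st.2 + 1), st.2 + 1) else (st.1, 1) := by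
      have g1 : ((k : Int) + 1) = ((k + 1 : Nat) : Int) := by push_cast; ring
      have g2 : ((k + 1 : Nat) : Int) - 1 = ((k : Nat) : Int) := by push_cast; ring
      simp only [pvStepA, g1, g2, PySem.List.pyGetD_natCast, hgk, hgk1]
    rw [e2, e1, ih (k + 1) _ (by omega), List.drop_eq_getElem_cons hk1, hgk, hgk1]
    by_cases hbc : ws[k + 1] == ws[k]
    · simp [pvLoopA, hbc]
    · simp [pvLoopA, hbc]

lemma pvMrc_ge : ∀ (xs : List String) (prev : String) (c : Int), c ≤ pvMrc prev c xs := by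
  intro xs
  induction xs with
  | nil => intro prev c; simp [pvMrc]
  | cons x xs ih =>
    intro prev c
    simp only [pvMrc]
    split
    · exact le_trans (by omega) (ih x (c + 1))
    · omega

lemma pvLoopA_max : ∀ (xs : List String) (prev : String) (m c : Int), 1 ≤ c → c ≤ m →
    (pvLoopA prev xs (m, c)).1 = max m (pvMrc prev c xs) := by
  intro xs
  induction xs with
  | nil => intro prev m c h1 h2; simp [pvLoopA, pvMrc]; omega
  | cons x xs ih =>
    intro prev m c h1 h2
    simp only [pvLoopA, pvMrc]
    split
    · rw [ih x (max m (c + 1)) (c + 1) (by omega) (by omega)]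
      have := pvMrc_ge xs x (c + 1)
      omega
    · rw [ih x m 1 (by omega) (by omega)]
      have := pvMrc_ge xs x 1
      omega

lemma pvFoldl_max_max : ∀ (l : List Int) (a b : Int),
    l.foldl max (max a b) = max a (l.foldl max b) := by
  intro l
  induction l with
  | nil => intro a b; simp
  | cons x l ih =>
    intro a b
    simp only [List.foldl_cons]
    rw [show max (max a b) x = max a (max b x) by omega, ih]

lemma pvMrc_groups : ∀ (xs : List String) (prev : String) (c : Int), 1 ≤ c →
    pvMrc prev c xs
      = max (c + ((xs.takeWhile (fun y => y == prev)).length : Int))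
          ((pvGroups (xs.drop (xs.takeWhile (fun y => y == prev)).length)).foldl max 1) := by
  intro xs
  induction xs with
  | nil => intro prev c h1; simp [pvMrc, pvGroups_nil]; omega
  | cons x xs ih =>
    intro prev c h1
    by_cases hbc : x == prev
    · have hxp : x = prev := eq_of_beq hbc
      subst hxp
      simp only [pvMrc, beq_self_eq_true, if_true, List.takeWhile_cons,
        List.length_cons, List.drop_succ_cons]
      rw [ih x (c + 1) (by omega)]
      push_cast
      omega
    · have hbf : (x == prev) = false := by simpa using hbc
      simp only [pvMrc, hbf, Bool.false_eq_true, if_false, List.takeWhile_cons,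
        List.length_nil, Nat.cast_zero, add_zero, List.drop_zero]
      rw [ih x 1 (by omega), pvGroups_cons, List.foldl_cons]
      have hnn : (0 : Int) ≤ ((xs.takeWhile (fun y => y == x)).length : Int) := by positivity
      rw [show max (1 : Int) (((xs.takeWhile (fun y => y == x)).length : Int) + 1)
            = max (((xs.takeWhile (fun y => y == x)).length : Int) + 1) 1 by omega]
      rw [pvFoldl_max_max]
      omega

-- ===== VERDICT (by name: the statement is the Claim_ definition above) =====
theorem detect_repetition_spec : Claim_equal_detect_repetition := by
  intro text _
  unfold Spec_detect_repetition detect_repetition detect_repetition_alt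
  cases hws : PySem.Str.split₀ text with
  | nil => simp [PySem.List.len]
  | cons w rest =>
    have hb := pvBridge (w :: rest) rest.length 0 (1, 1) (by simp; omega)
    simp only [Nat.cast_zero, zero_add, List.getD_cons_zero, List.drop_one,
      List.tail_cons, List.length_cons] at hb
    have hmax : (List.foldl (pvStepA (w :: rest)) (1, 1)
          (PySem.List.pyRange 1 ((rest.length + 1 : Nat) : Int) 1)).1
        = (PySem.List.max? (pvGroups (w :: rest)) (fun x => x)).getD 1 := by
      rw [hb, pvLoopA_max rest w 1 1 (by omega) (by omega)]
      have hge := pvMrc_ge rest w 1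
      rw [pvGroups_cons, PySem.List.max?_id_cons]
      simp only [Option.getD_some]
      rw [pvMrc_groups rest w 1 (by omega)]
      have h1 : (pvGroups (rest.drop (rest.takeWhile (fun y => y == w)).length)).foldl max
            (((rest.takeWhile (fun y => y == w)).length : Int) + 1)
          = max (((rest.takeWhile (fun y => y == w)).length : Int) + 1)
              ((pvGroups (rest.drop (rest.takeWhile (fun y => y == w)).length)).foldl max 1) := by
        rw [← pvFoldl_max_max]
        congr 1
        omega
      rw [h1]
      omega
    have hne : ((((rest.length + 1 : Nat) : Int)) == 0) = false := by
      simp only [beq_eq_false_iff_ne, ne_eq]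
      omega
    simp only [PySem.List.len_eq, List.length_cons, hne, Bool.false_eq_true, if_false,
      List.isEmpty_cons, hmax]
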